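-- pv_equiv track=rewrite | github.com/ignaciocruz65/LABORATORIO1 | Stark03Functions.py | lista_color
-- ===== SOURCE A (Python) =====
-- def lista_color(dicc,clave1):
--     '''
--     La funcion recibe como parametro un diccionario y una clave, se recorre el diccionario y se verifica que el dato solicitado este en el,
--     en caso de que el dato se encuentre, se agrega al diccionario, caso contrario se crea una nueva clave color en el diccionario y le asigna una lista que contiene el nombre del elemento actual.
--     '''
--     dicct = {}
--     for iter in dicc:
--         dato = iter[clave1].lower()
--         if dato in dicct:
--             dicct[dato].append(iter["nombre"])
--         else:
--             dicct[dato] = [iter["nombre"]]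
--     return dicct
-- ===== SOURCE B (Python) =====
-- def lista_color(dicc, clave1):
--     # Two-pass grouping: collect the distinct lowercased color keys in first-appearance
--     # order, then build each group's name list with one comprehension per key.
--     keys = []
--     for it in dicc:
--         k = it[clave1].lower()
--         if k not in keys:
--             keys.append(k)
--     return {k: [it["nombre"] for it in dicc if it[clave1].lower() == k] for k in keys}
-- ===== Notes on version B (the rewrite author's own statement) =====
-- stated objective: alternative
-- what changed: A builds the grouping in one pass with a dict accumulator (lookup-then-append or create); B first collects the distinct lowercased keys in order of first appearance and then builds the whole result as a dict comprehension with one filtering pass per key. Pre_ excludes only inputs where some item lacks the clave1 or 'nombre' key, on which A raises KeyError (B raises too).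
import Mathlib
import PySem

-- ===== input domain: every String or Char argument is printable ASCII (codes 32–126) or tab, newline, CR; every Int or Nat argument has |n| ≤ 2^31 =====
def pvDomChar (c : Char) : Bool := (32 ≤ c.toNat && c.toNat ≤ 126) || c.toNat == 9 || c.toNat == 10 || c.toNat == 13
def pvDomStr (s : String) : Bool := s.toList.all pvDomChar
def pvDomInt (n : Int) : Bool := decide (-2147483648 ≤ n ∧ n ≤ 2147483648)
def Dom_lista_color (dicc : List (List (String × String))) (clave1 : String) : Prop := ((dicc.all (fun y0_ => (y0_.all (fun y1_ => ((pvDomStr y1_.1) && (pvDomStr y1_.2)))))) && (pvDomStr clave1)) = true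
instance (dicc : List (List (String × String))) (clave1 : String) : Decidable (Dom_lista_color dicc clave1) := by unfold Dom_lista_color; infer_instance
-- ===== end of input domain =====

-- B groups by first collecting the distinct lowercased keys, then one filtering pass per
-- key (a dict comprehension); A's single pass with a dict accumulator. Same cost, different shape.

-- ===== PORT A =====
-- iter[clave1] / iter["nombre"] raise KeyError when the key is missing; those inputs are
-- excluded by Pre_lista_color, and there getD's default is never used.
def lista_color (dicc : List (List (String × String))) (clave1 : String) : List (String × List String) :=
  (dicc.foldl (fun dicct iter =>
      let dato := PySem.Str.lower ((PySem.Dict.mk iter).getD clave1 "")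
      if dicct.contains dato then
        dicct.insert dato (dicct.getD dato [] ++ [(PySem.Dict.mk iter).getD "nombre" ""])
      else
        dicct.insert dato [(PySem.Dict.mk iter).getD "nombre" ""])
    (PySem.Dict.empty : PySem.Dict String (List String))).items

-- ===== PORT B =====
-- the dict comprehension over the distinct keys is the items list in key order
def lista_color_alt (dicc : List (List (String × String))) (clave1 : String) : List (String × List String) :=
  let keyOf := fun (it : List (String × String)) => PySem.Str.lower ((PySem.Dict.mk it).getD clave1 "")
  let keys := dicc.foldl (fun ks it => if keyOf it ∈ ks then ks else ks ++ [keyOf it]) []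
  keys.map (fun k => (k, (dicc.filter (fun it => keyOf it == k)).map
                           (fun it => (PySem.Dict.mk it).getD "nombre" "")))

-- ===== PRECONDITION & SPEC =====
-- exactly the inputs on which A returns: every item has both the clave1 key and "nombre" (else KeyError)
def Pre_lista_color (dicc : List (List (String × String))) (clave1 : String) : Prop :=
  ∀ it ∈ dicc, clave1 ∈ it.map Prod.fst ∧ "nombre" ∈ it.map Prod.fst
instance (dicc : List (List (String × String))) (clave1 : String) : Decidable (Pre_lista_color dicc clave1) := by unfold Pre_lista_color; infer_instance
def pvWitness_lista_color : (List (List (String × String))) × String :=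
  ([[("color", "Red"), ("nombre", "a")], [("color", "red"), ("nombre", "b")]], "color")

def Spec_lista_color (dicc : List (List (String × String))) (clave1 : String) (out : List (String × List String)) : Prop := out = lista_color_alt dicc clave1
instance (dicc : List (List (String × String))) (clave1 : String) (out : List (String × List String)) : Decidable (Spec_lista_color dicc clave1 out) := by unfold Spec_lista_color; infer_instance

-- ===== CLAIM (what is proved, stated in full; the proofs are below) =====
def Claim_equal_lista_color : Prop := ∀ (dicc : List (List (String × String))) (clave1 : String), Dom_lista_color dicc clave1 → Pre_lista_color dicc clave1 → Spec_lista_color dicc clave1 (lista_color dicc clave1)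

-- ===== LEMMAS AND PROOFS =====

-- A's loop body is exactly 'dicct[dato] = dicct.get(dato, []) + [nombre]', i.e. Dict.modify
theorem lista_color_step_eq_modify (d : PySem.Dict String (List String)) (k : String) (v : String) :
    (if d.contains k then d.insert k (d.getD k [] ++ [v]) else d.insert k [v])
      = d.modify k [] (· ++ [v]) := by
  by_cases h : d.contains k = true
  · simp [h, PySem.Dict.modify]
  · simp [h, PySem.Dict.modify, PySem.Dict.getD_of_not_contains d ([] : List String)
      (by simpa using h)]

theorem lista_color_spec' (dicc : List (List (String × String))) (clave1 : String) :
    lista_color dicc clave1 = lista_color_alt dicc clave1 := by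
  unfold lista_color lista_color_alt
  dsimp only
  set keyOf := fun (it : List (String × String)) =>
      PySem.Str.lower ((PySem.Dict.mk it).getD clave1 "") with hkey
  set nomOf := fun (it : List (String × String)) => (PySem.Dict.mk it).getD "nombre" "" with hnom
  -- rewrite A's fold into a modify-fold over the (key, name) pairs
  have hA : (dicc.foldl (fun dicct iter =>
      let dato := keyOf iter
      if dicct.contains dato then
        dicct.insert dato (dicct.getD dato [] ++ [nomOf iter])
      else dicct.insert dato [nomOf iter])
      (PySem.Dict.empty : PySem.Dict String (List String)))
      = (dicc.map (fun it => (keyOf it, nomOf it))).foldl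
          (fun d p => d.modify p.1 [] (· ++ [p.2])) PySem.Dict.empty := by
    rw [List.foldl_map]
    exact PySem.List.foldl_congr_mem _ _ _ _
      (fun d it _ => lista_color_step_eq_modify d (keyOf it) (nomOf it))
  rw [hA]
  set pl := dicc.map (fun it => (keyOf it, nomOf it)) with hpl
  set D := pl.foldl (fun d p => d.modify p.1 [] (· ++ [p.2]))
      (PySem.Dict.empty : PySem.Dict String (List String)) with hD
  have hplfst : pl.map Prod.fst = dicc.map keyOf := by
    rw [hpl, List.map_map]; rfl
  -- D's keys are the ordered dedup of the key column
  have hDkeys : D.keys = PySem.Set.ofList (dicc.map keyOf) := by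
    have := PySem.Dict.keys_foldl_modify_key pl Prod.fst ([] : List String)
      (fun _ p => (· ++ [p.2])) (PySem.Dict.empty : PySem.Dict String (List String))
    rw [hD, this, PySem.Dict.keys_empty, hplfst]
    exact PySem.Set.update_empty _
  -- B's keys list is the same dedup
  have hkeys : (dicc.foldl (fun ks it => if keyOf it ∈ ks then ks else ks ++ [keyOf it]) [])
      = PySem.Set.ofList (dicc.map keyOf) := by
    have h1 : (dicc.foldl (fun ks it => if keyOf it ∈ ks then ks else ks ++ [keyOf it]) [])
        = dicc.foldl (fun s it => PySem.Set.add s (keyOf it)) [] :=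
      PySem.List.foldl_congr_mem _ _ _ _ (fun s it _ => (PySem.Set.add_eq_ite s (keyOf it)).symm)
    rw [h1, ← PySem.Set.update_map_eq_foldl_add]
    exact PySem.Set.update_empty _
  -- each group's value
  have hval : ∀ k : String, D.getD k []
      = (dicc.filter (fun it => keyOf it == k)).map nomOf := by
    intro k
    rw [hD, PySem.Dict.getD_foldl_modify_append pl PySem.Dict.empty k,
      PySem.Dict.getD_empty, hpl, List.filter_map, List.map_map]
    rfl
  have hnodup : D.keys.Nodup := by
    rw [hDkeys]; exact PySem.Set.nodup_ofList _
  rw [PySem.Dict.items_eq_map_keys D hnodup ([] : List String), hDkeys, hkeys]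
  refine List.map_congr_left (fun k _ => ?_)
  rw [hval k]

-- ===== VERDICT (by name: the statement is the Claim_ definition above) =====
theorem lista_color_spec : Claim_equal_lista_color := by
  intro dicc clave1 _ _
  unfold Spec_lista_color
  exact lista_color_spec' dicc clave1
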